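-- pv_equiv track=rewrite | github.com/gavlooth/omnilisp | tooling/omni-lsp/omni_lsp_format_helpers.py | _leading_closer_count
-- ===== SOURCE A (Python) =====
-- def _leading_closer_count(text: str) -> int:
--     count = 0
--     index = 0
--     while index < len(text):
--         char = text[index]
--         if char.isspace():
--             index += 1
--             continue
--         if char in ")]}":
--             count += 1
--             index += 1
--             continue
--         break
--     return count
-- ===== SOURCE B (Python) =====
-- def _leading_closer_count(text: str) -> int:
--     # Different algorithm: whitespace anywhere never affects the answer (the scan
--     # stops at the first char that is neither whitespace nor a closer), so remove
--     # ALL whitespace first, then the answer is the length of the leading run of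
--     # closers, computed by arithmetic on lstrip with a charset -- no explicit loop.
--     squeezed = "".join(text.split())
--     return len(squeezed) - len(squeezed.lstrip(")]}"))
-- ===== Notes on version B (the rewrite author's own statement) =====
-- stated objective: simpler
-- what changed: Instead of a fused index loop that tests and counts, B first deletes every whitespace character from the string and then returns the length of its leading run of closer characters by length arithmetic on a charset lstrip, relying on the fact that whitespace never affects the count.
import Mathlib
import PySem

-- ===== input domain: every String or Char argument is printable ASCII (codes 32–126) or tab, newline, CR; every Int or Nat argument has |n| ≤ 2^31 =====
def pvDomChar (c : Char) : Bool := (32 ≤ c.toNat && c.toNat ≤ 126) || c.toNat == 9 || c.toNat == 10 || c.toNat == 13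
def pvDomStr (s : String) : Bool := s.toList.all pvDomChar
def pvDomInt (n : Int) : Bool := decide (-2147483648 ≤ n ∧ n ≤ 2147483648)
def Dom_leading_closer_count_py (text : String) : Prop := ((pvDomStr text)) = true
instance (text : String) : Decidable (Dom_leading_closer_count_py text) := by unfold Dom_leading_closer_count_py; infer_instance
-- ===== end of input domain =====

-- B deletes all whitespace first, then measures the leading closer run by length
-- arithmetic (len - len after lstrip(")]}")); simpler, no fused test-and-count loop.


-- ===== PORT A =====
-- A's while loop, as structural recursion over the remaining characters with the
-- same running state (count); branches in the same order.
def lccA_loop (count : Int) : List Char → Int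
  | [] => count
  | c :: rest =>
    if PySem.Chars.isspace c then
      lccA_loop count rest
    else if [')', ']', '}'].contains c then
      lccA_loop (count + 1) rest
    else
      count

def leading_closer_count_py (text : String) : Int :=
  lccA_loop 0 text.toList

-- ===== PORT B =====
def lccB_closer (c : Char) : Bool := [')', ']', '}'].contains c

def leading_closer_count_py_alt (text : String) : Int :=
  -- ''.join(text.split()) = the characters that are not whitespace, in order;
  -- lstrip(")]}") = dropWhile closer; the count is the length difference.
  let squeezed := text.toList.filter (fun c => !PySem.Chars.isspace c)
  ((squeezed.length : Int) - ((squeezed.dropWhile lccB_closer).length : Int))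

-- ===== PRECONDITION & SPEC =====
def Spec_leading_closer_count_py (text : String) (out : Int) : Prop := out = leading_closer_count_py_alt text
instance (text : String) (out : Int) : Decidable (Spec_leading_closer_count_py text out) := by unfold Spec_leading_closer_count_py; infer_instance

-- ===== CLAIM (what is proved, stated in full; the proofs are below) =====
def Claim_equal_leading_closer_count_py : Prop := ∀ (text : String), Dom_leading_closer_count_py text → Spec_leading_closer_count_py text (leading_closer_count_py text)

-- ===== LEMMAS AND PROOFS =====
theorem lccA_loop_eq (cs : List Char) : ∀ (count : Int),
    lccA_loop count cs =
      count + (((cs.filter (fun c => !PySem.Chars.isspace c)).takeWhile lccB_closer).length : Int) := by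
  induction cs with
  | nil => intro count; simp [lccA_loop]
  | cons c rest ih =>
    intro count
    by_cases hs : PySem.Chars.isspace c
    · simp [lccA_loop, hs, ih]
    · by_cases hc : lccB_closer c
      · have hm : c = ')' ∨ c = ']' ∨ c = '}' := by simpa [lccB_closer] using hc
        simp [lccA_loop, hs, hm, List.filter, hc, ih]
        ring
      · have hm : ¬(c = ')' ∨ c = ']' ∨ c = '}') := by simpa [lccB_closer] using hc
        simp [lccA_loop, hs, hm, List.filter, hc]

theorem len_sub_dropWhile (l : List Char) :
    ((l.length : Int) - ((l.dropWhile lccB_closer).length : Int)) =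
      ((l.takeWhile lccB_closer).length : Int) := by
  have h : (l.takeWhile lccB_closer).length + (l.dropWhile lccB_closer).length = l.length := by
    rw [← List.length_append, List.takeWhile_append_dropWhile]
  omega

-- ===== VERDICT (by name: the statement is the Claim_ definition above) =====
theorem leading_closer_count_py_spec : Claim_equal_leading_closer_count_py := by
  intro text _
  unfold Spec_leading_closer_count_py leading_closer_count_py leading_closer_count_py_alt
  rw [lccA_loop_eq, len_sub_dropWhile]
  ring
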